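-- pv_equiv track=rewrite | github.com/Ethycs/event_tool | src/event_harvester/weights.py | _link_type_score
-- ===== SOURCE A (Python) =====
-- _LINK_EVENT_DOMAINS = [
--     "luma.com", "eventbrite", "meetup.com", "rsvp", "calendar",
-- ]
--
-- _LINK_TECH_DOMAINS = [
--     "openai.com", "anthropic", "claude.ai", "arxiv", "github.com",
-- ]
--
-- _LINK_ARTICLE_DOMAINS = [
--     "medium.com", "substack", "blog", "article",
-- ]
--
-- _LINK_SOCIAL_DOMAINS = [
--     "instagram.com", "twitter.com", "x.com", "youtube.com",
-- ]
--
-- _LINK_SKIP_DOMAINS = [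
--     "tenor.com", "giphy.com",
-- ]
--
-- def _link_type_score(url: str) -> int:
--     """0-8 score by link category."""
--     u = url.lower()
--     if any(k in u for k in _LINK_SKIP_DOMAINS):
--         return 0
--     if any(k in u for k in _LINK_EVENT_DOMAINS):
--         return 8
--     if any(k in u for k in _LINK_TECH_DOMAINS):
--         return 6
--     if any(k in u for k in _LINK_ARTICLE_DOMAINS):
--         return 5
--     if any(k in u for k in _LINK_SOCIAL_DOMAINS):
--         return 3
--     if "discord.com/channels" in u:
--         return 1
--     return 4
-- ===== SOURCE B (Python) =====
-- _LINK_EVENT_DOMAINS = [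
--     "luma.com", "eventbrite", "meetup.com", "rsvp", "calendar",
-- ]
-- _LINK_TECH_DOMAINS = [
--     "openai.com", "anthropic", "claude.ai", "arxiv", "github.com",
-- ]
-- _LINK_ARTICLE_DOMAINS = [
--     "medium.com", "substack", "blog", "article",
-- ]
-- _LINK_SOCIAL_DOMAINS = [
--     "instagram.com", "twitter.com", "x.com", "youtube.com",
-- ]
-- _LINK_SKIP_DOMAINS = [
--     "tenor.com", "giphy.com",
-- ]
--
-- # Flat pattern list: (priority rank, score, pattern), rank 0 = highest priority.
-- _CATEGORIES = [
--     (0, _LINK_SKIP_DOMAINS),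
--     (8, _LINK_EVENT_DOMAINS),
--     (6, _LINK_TECH_DOMAINS),
--     (5, _LINK_ARTICLE_DOMAINS),
--     (3, _LINK_SOCIAL_DOMAINS),
--     (1, ["discord.com/channels"]),
-- ]
-- _PATTERNS = [(rank, score, k)
--              for rank, (score, pats) in enumerate(_CATEGORIES)
--              for k in pats]
--
-- def _link_type_score(url: str) -> int:
--     """0-8 score by link category."""
--     u = url.lower()
--     best = (6, 4)  # (rank past every category, default score)
--     for rank, score, k in _PATTERNS:
--         if rank < best[0] and k in u:
--             best = (rank, score)
--     return best[1]
-- ===== Notes on version B (the rewrite author's own statement) =====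
-- stated objective: alternative
-- what changed: Instead of an ordered if-chain with early returns, B scans the whole flat (rank, score, pattern) list once, keeping the best (minimum-rank) matching category in an accumulator and returning its score, defaulting to 4.
import Mathlib
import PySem

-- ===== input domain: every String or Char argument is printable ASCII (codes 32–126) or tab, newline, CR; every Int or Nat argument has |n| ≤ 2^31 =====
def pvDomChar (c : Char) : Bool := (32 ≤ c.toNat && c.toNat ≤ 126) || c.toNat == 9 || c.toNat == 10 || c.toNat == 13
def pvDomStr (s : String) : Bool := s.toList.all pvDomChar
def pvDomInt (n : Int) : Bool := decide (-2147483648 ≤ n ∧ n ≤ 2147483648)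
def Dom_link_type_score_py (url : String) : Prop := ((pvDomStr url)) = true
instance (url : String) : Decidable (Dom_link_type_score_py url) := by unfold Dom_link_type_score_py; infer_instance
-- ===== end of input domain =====

-- B replaces A's early-return if-chain by one exhaustive scan of a flat (rank, score, pattern)
-- list keeping the minimum-rank match in an accumulator (objective: alternative decomposition).

-- ===== PORT A =====
def pvEventDomains : List String := ["luma.com", "eventbrite", "meetup.com", "rsvp", "calendar"]
def pvTechDomains : List String := ["openai.com", "anthropic", "claude.ai", "arxiv", "github.com"]
def pvArticleDomains : List String := ["medium.com", "substack", "blog", "article"]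
def pvSocialDomains : List String := ["instagram.com", "twitter.com", "x.com", "youtube.com"]
def pvSkipDomains : List String := ["tenor.com", "giphy.com"]

def link_type_score_py (url : String) : Int :=
  let u := PySem.Str.lower url
  if pvSkipDomains.any (fun k => PySem.Str.isIn k u) then 0
  else if pvEventDomains.any (fun k => PySem.Str.isIn k u) then 8
  else if pvTechDomains.any (fun k => PySem.Str.isIn k u) then 6
  else if pvArticleDomains.any (fun k => PySem.Str.isIn k u) then 5
  else if pvSocialDomains.any (fun k => PySem.Str.isIn k u) then 3
  else if PySem.Str.isIn "discord.com/channels" u then 1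
  else 4

-- ===== PORT B =====
def pvCategories : List (Int × List String) :=
  [(0, pvSkipDomains), (8, pvEventDomains), (6, pvTechDomains),
   (5, pvArticleDomains), (3, pvSocialDomains), (1, ["discord.com/channels"])]

-- the flattening comprehension of Source B: [(rank, score, k) for rank,(score,pats) in enumerate(_CATEGORIES) for k in pats]
def pvPatterns : List (Int × Int × String) :=
  (PySem.List.enumerate pvCategories).flatMap
    (fun rp => rp.2.2.map (fun k => (rp.1, rp.2.1, k)))

-- one step of Source B's loop: keep the lower-rank match
def pvStep (u : String) (best : Int × Int) (p : Int × Int × String) : Int × Int :=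
  if p.1 < best.1 && PySem.Str.isIn p.2.2 u then (p.1, p.2.1) else best

def link_type_score_py_alt (url : String) : Int :=
  let u := PySem.Str.lower url
  (pvPatterns.foldl (pvStep u) (6, 4)).2

-- ===== PRECONDITION & SPEC =====
def Spec_link_type_score_py (url : String) (out : Int) : Prop := out = link_type_score_py_alt url
instance (url : String) (out : Int) : Decidable (Spec_link_type_score_py url out) := by unfold Spec_link_type_score_py; infer_instance

-- ===== CLAIM (what is proved, stated in full; the proofs are below) =====
def Claim_equal_link_type_score_py : Prop := ∀ (url : String), Dom_link_type_score_py url → Spec_link_type_score_py url (link_type_score_py url)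

-- ===== LEMMAS AND PROOFS =====

-- once the accumulator's rank is ≤ every remaining rank, the fold is stuck
theorem pvFold_stuck (u : String) (b : Int × Int) (l : List (Int × Int × String))
    (h : ∀ p ∈ l, b.1 ≤ p.1) : List.foldl (pvStep u) b l = b := by
  induction l with
  | nil => rfl
  | cons p l ih =>
      have hp : b.1 ≤ p.1 := h p (List.mem_cons_self ..)
      have hs : pvStep u b p = b := by
        unfold pvStep
        have : ¬ p.1 < b.1 := not_lt.mpr hp
        simp [this]
      rw [List.foldl_cons, hs]
      exact ih (fun q hq => h q (List.mem_cons_of_mem _ hq))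

-- folding over one uniform-rank group followed by a not-lower-rank tail:
-- first match in the group decides, otherwise the group is skipped
theorem pvFold_group (u : String) (r s : Int) (ks : List String)
    (l : List (Int × Int × String)) (b : Int × Int)
    (hb : r < b.1) (htail : ∀ p ∈ l, r ≤ p.1) :
    List.foldl (pvStep u) b (ks.map (fun k => (r, s, k)) ++ l) =
      (if ks.any (fun k => PySem.Str.isIn k u) then (r, s)
       else List.foldl (pvStep u) b l) := by
  induction ks with
  | nil => simp
  | cons k ks ih =>
      rw [List.map_cons, List.cons_append, List.foldl_cons]
      by_cases hk : PySem.Str.isIn k u = true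
      · have hstep : pvStep u b (r, s, k) = (r, s) := by
          unfold pvStep; rw [hk]; simp [hb]
        have hrest : List.foldl (pvStep u) (r, s) (ks.map (fun k => (r, s, k)) ++ l) = (r, s) := by
          apply pvFold_stuck
          intro p hp
          rcases List.mem_append.mp hp with h1 | h2
          · rcases List.mem_map.mp h1 with ⟨k', _, rfl⟩; exact le_refl r
          · exact htail p h2
        have hany : ((k :: ks).any fun k => PySem.Str.isIn k u) = true := by
          rw [List.any_cons, hk, Bool.true_or]
        rw [hstep, hrest, hany, if_pos rfl]
      · have hk' : PySem.Str.isIn k u = false := by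
          simp only [Bool.not_eq_true] at hk; exact hk
        have hstep : pvStep u b (r, s, k) = b := by
          unfold pvStep; rw [hk']; simp
        have hany : ((k :: ks).any fun k => PySem.Str.isIn k u)
            = (ks.any fun k => PySem.Str.isIn k u) := by
          rw [List.any_cons, hk', Bool.false_or]
        rw [hstep, ih, hany]

-- pvPatterns, spelled as the six uniform-rank groups
theorem pvPatterns_eq :
    pvPatterns =
      pvSkipDomains.map (fun k => ((0 : Int), (0 : Int), k)) ++
      (pvEventDomains.map (fun k => ((1 : Int), (8 : Int), k)) ++
      (pvTechDomains.map (fun k => ((2 : Int), (6 : Int), k)) ++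
      (pvArticleDomains.map (fun k => ((3 : Int), (5 : Int), k)) ++
      (pvSocialDomains.map (fun k => ((4 : Int), (3 : Int), k)) ++
      (["discord.com/channels"].map (fun k => ((5 : Int), (1 : Int), k)) ++ []))))) := by
  decide

-- B's min-rank fold equals A's if-chain, for any haystack u
theorem pvMain (u : String) :
    (List.foldl (pvStep u) (6, 4) pvPatterns).2 =
      (if pvSkipDomains.any (fun k => PySem.Str.isIn k u) then (0 : Int)
       else if pvEventDomains.any (fun k => PySem.Str.isIn k u) then 8
       else if pvTechDomains.any (fun k => PySem.Str.isIn k u) then 6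
       else if pvArticleDomains.any (fun k => PySem.Str.isIn k u) then 5
       else if pvSocialDomains.any (fun k => PySem.Str.isIn k u) then 3
       else if PySem.Str.isIn "discord.com/channels" u then 1
       else 4) := by
  rw [pvPatterns_eq]
  rw [pvFold_group u 0 0 _ _ _ (by norm_num) (by decide)]
  rw [pvFold_group u 1 8 _ _ _ (by norm_num) (by decide)]
  rw [pvFold_group u 2 6 _ _ _ (by norm_num) (by decide)]
  rw [pvFold_group u 3 5 _ _ _ (by norm_num) (by decide)]
  rw [pvFold_group u 4 3 _ _ _ (by norm_num) (by decide)]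
  rw [pvFold_group u 5 1 _ _ _ (by norm_num) (by decide)]
  simp only [List.any_cons, List.any_nil, Bool.or_false, List.foldl_nil]
  split_ifs <;> rfl

-- ===== VERDICT (by name: the statement is the Claim_ definition above) =====
theorem link_type_score_py_spec : Claim_equal_link_type_score_py := by
  intro url _
  unfold Spec_link_type_score_py
  simp only [link_type_score_py, link_type_score_py_alt]
  exact (pvMain (PySem.Str.lower url)).symm
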